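-- pv_equiv track=rewrite | github.com/kamil-iitmds/acegame | main.py | distribute_cards
-- ===== SOURCE A (Python) =====
-- def distribute_cards(cards:list,n_hands:int):
--     x = list()
--     for i in range(0,n_hands):
--         x.append(list())
--     p = 0
--     for i in range(0,len(cards)):
--         x[p].append(cards[i])
--         p = p + 1
--         if p == n_hands:
--             p = 0
--     return x
-- ===== SOURCE B (Python) =====
-- def distribute_cards(cards: list, n_hands: int):
--     return [cards[j::n_hands] for j in range(n_hands)]
-- ===== Notes on version B (the rewrite author's own statement) =====
-- stated objective: idiomatic
-- what changed: B builds hand j directly as the strided slice cards[j::n_hands] instead of dealing every card one by one with a rotating hand pointer.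
import Mathlib
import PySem

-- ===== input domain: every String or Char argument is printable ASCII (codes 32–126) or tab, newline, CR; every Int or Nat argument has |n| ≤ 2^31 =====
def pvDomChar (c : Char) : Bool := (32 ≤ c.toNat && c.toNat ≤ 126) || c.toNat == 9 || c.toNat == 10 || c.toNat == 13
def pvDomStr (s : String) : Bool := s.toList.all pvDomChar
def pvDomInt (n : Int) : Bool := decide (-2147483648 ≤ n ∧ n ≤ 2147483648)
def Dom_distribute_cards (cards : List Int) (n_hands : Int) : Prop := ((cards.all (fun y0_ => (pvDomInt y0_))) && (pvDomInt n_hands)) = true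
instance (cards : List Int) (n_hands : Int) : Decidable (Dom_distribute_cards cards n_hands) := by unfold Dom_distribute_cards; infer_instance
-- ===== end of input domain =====

-- B builds each hand j directly as the strided slice cards[j::n_hands] instead of dealing
-- cards one by one with a rotating hand pointer (idiomatic; same asymptotic cost).

-- ===== PORT A =====
def distribute_cards (cards : List Int) (n_hands : Int) : List (List Int) :=
  -- x = []; for i in range(0, n_hands): x.append([])   (the built x is the initial loop state below)
  -- p = 0; for i in range(0, len(cards)): x[p].append(cards[i]); p = p + 1; if p == n_hands: p = 0
  ((PySem.List.pyRange 0 (cards.length : Int) 1).foldl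
    (fun (st : List (List Int) × Int) i =>
      (PySem.List.pySetD st.1 st.2
         (PySem.List.pyGetD st.1 st.2 [] ++ [PySem.List.pyGetD cards i 0]),
       if st.2 + 1 = n_hands then 0 else st.2 + 1))
    ((PySem.List.pyRange 0 n_hands 1).foldl (fun acc _ => acc ++ [[]]) [], 0)).1

-- ===== PORT B =====
-- return [cards[j::n_hands] for j in range(n_hands)]
def distribute_cards_alt (cards : List Int) (n_hands : Int) : List (List Int) :=
  (PySem.List.pyRange 0 n_hands 1).map
    (fun j => (PySem.List.slice? cards (some j) none n_hands).getD [])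

-- ===== PRECONDITION & SPEC =====
-- Pre_ excludes exactly the inputs (non-empty cards with n_hands ≤ 0) on which A raises IndexError.
def Pre_distribute_cards (cards : List Int) (n_hands : Int) : Prop :=
  1 ≤ n_hands ∨ cards = []
instance (cards : List Int) (n_hands : Int) : Decidable (Pre_distribute_cards cards n_hands) := by unfold Pre_distribute_cards; infer_instance
def pvWitness_distribute_cards : List Int × Int := ([5, 2, 7, 1, 3], 2)

def Spec_distribute_cards (cards : List Int) (n_hands : Int) (out : List (List Int)) : Prop := out = distribute_cards_alt cards n_hands
instance (cards : List Int) (n_hands : Int) (out : List (List Int)) : Decidable (Spec_distribute_cards cards n_hands out) := by unfold Spec_distribute_cards; infer_instance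

-- ===== CLAIM (what is proved, stated in full; the proofs are below) =====
def Claim_equal_distribute_cards : Prop := ∀ (cards : List Int) (n_hands : Int), Dom_distribute_cards cards n_hands → Pre_distribute_cards cards n_hands → Spec_distribute_cards cards n_hands (distribute_cards cards n_hands)

-- ===== LEMMAS AND PROOFS =====

-- The round-robin deal as a recursion on the card list: card c (hand pointer p) is prepended
-- to hand p of the deal of the rest, with the pointer advanced exactly as in A.
def dealAux (n : Nat) : Nat → List Int → List (List Int)
  | _, [] => List.replicate n []
  | p, c :: cs => (dealAux n (if p + 1 = n then 0 else p + 1) cs).modify p (c :: ·)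

-- stride xs o s = the elements of xs at indices o, o+s, o+2s, …  (= xs[o::s] for s ≥ 1)
def stride : List Int → Nat → Nat → List Int
  | [], _, _ => []
  | c :: cs, 0, s => c :: stride cs (s - 1) s
  | _ :: cs, o + 1, s => stride cs o s

theorem length_dealAux (n : Nat) (p : Nat) (cs : List Int) : (dealAux n p cs).length = n := by
  induction cs generalizing p with
  | nil => simp [dealAux]
  | cons c cs ih => simp [dealAux, ih]

theorem dealAux_getElem (n : Nat) (cs : List Int) (p j : Nat) (hp : p < n) (hj : j < n) :
    (dealAux n p cs)[j]'(by simp [length_dealAux, hj]) =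
      stride cs (if p ≤ j then j - p else j + n - p) n := by
  induction cs generalizing p j with
  | nil =>
    simp only [dealAux]
    rw [List.getElem_replicate]
    rfl
  | cons c cs ih =>
    simp only [dealAux]
    rw [List.getElem_modify]
    have h1 : (if p + 1 = n then 0 else p + 1) < n := by split <;> omega
    rw [ih _ _ h1 hj]
    by_cases hjp : p = j
    · subst hjp
      rw [if_pos rfl]
      have ho : (if p ≤ p then p - p else p + n - p) = 0 := by simp
      rw [ho]
      have hi : (if (if p + 1 = n then 0 else p + 1) ≤ p then p - (if p + 1 = n then 0 else p + 1)
                 else p + n - (if p + 1 = n then 0 else p + 1)) = n - 1 := by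
        split_ifs <;> omega
      rw [hi]
      rfl
    · rw [if_neg hjp]
      have ho : (if p ≤ j then j - p else j + n - p) =
          (if (if p + 1 = n then 0 else p + 1) ≤ j then j - (if p + 1 = n then 0 else p + 1)
           else j + n - (if p + 1 = n then 0 else p + 1)) + 1 := by
        split_ifs <;> omega
      rw [ho]
      rfl

theorem stride_eq_filterMap (xs : List Int) (o s : Nat) (hs : 1 ≤ s) :
    stride xs o s = (List.range ((xs.length - o + s - 1) / s)).filterMap
      (fun k => xs[(o + s * k)]?) := by
  induction xs generalizing o with
  | nil =>
    have h0 : ((List.nil (α := Int)).length - o + s - 1) / s = 0 := Nat.div_eq_of_lt (by simp only [List.length_nil]; omega)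
    rw [h0]
    rfl
  | cons c cs ih =>
    match o with
    | 0 =>
      have hlen : (c :: cs).length - 0 + s - 1 = cs.length + s := by simp only [List.length_cons]; omega
      have hC : ((c :: cs).length - 0 + s - 1) / s = cs.length / s + 1 := by
        rw [hlen]; exact Nat.add_div_right _ (by omega)
      have hC' : (cs.length - (s - 1) + s - 1) / s = cs.length / s := by
        rcases Nat.lt_or_ge cs.length (s - 1) with h | h
        · rw [Nat.div_eq_of_lt (by omega), Nat.div_eq_of_lt (by omega)]
        · congr 1; omega
      rw [hC, List.range_succ_eq_map, List.filterMap_cons_some (b := c) (by simp), List.filterMap_map]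
      show c :: stride cs (s - 1) s = _
      congr 1
      rw [ih (s - 1), hC']
      apply List.filterMap_congr
      intro k _
      simp only [Function.comp_apply]
      rw [show 0 + s * (k + 1) = ((s - 1) + s * k) + 1 by rw [Nat.mul_succ]; omega]
      rw [List.getElem?_cons_succ]
    | o + 1 =>
      show stride cs o s = _
      rw [ih o]
      have hc : ((c :: cs).length - (o + 1) + s - 1) / s = (cs.length - o + s - 1) / s := by
        congr 1; simp only [List.length_cons]; omega
      rw [hc]
      apply List.filterMap_congr
      intro k _
      rw [show o + 1 + s * k = (o + s * k) + 1 by omega]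
      rw [List.getElem?_cons_succ]

theorem slice?_eq_filterMap (xs : List Int) (j n : Nat) (hn : 1 ≤ n) :
    PySem.List.slice? xs (some (j:Int)) none (n:Int) =
      some ((List.range ((xs.length - j + n - 1) / n)).filterMap (fun k => xs[j + n * k]?)) := by
  have h1 : ¬((n:Int) < 0) := by omega
  have h2 : ¬((n:Int) = 0) := by omega
  have h3 : ¬((j:Int) < 0) := by omega
  have h4 : (0:Int) < n := by omega
  unfold PySem.List.slice? PySem.List.sliceIndices
  simp only [h1, h2, h3, h4, if_false, if_true]
  rcases Nat.lt_or_ge j xs.length with hj | hj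
  · rw [min_eq_left (by omega), if_pos (by omega)]
    congr 1
    have hnum : ((xs.length:Int) - j + n - 1) = ((xs.length - j + n - 1 : Nat) : Int) := by omega
    rw [hnum]
    have hdiv : (((xs.length - j + n - 1 : Nat) : Int) / (n:Int)).toNat = (xs.length - j + n - 1) / n := rfl
    rw [hdiv]
    apply List.filterMap_congr
    intro k _
    have hidx : ((j:Int) + (n:Int) * (k:Int)) = ((j + n * k : Nat) : Int) := by push_cast; ring
    rw [hidx, Int.toNat_natCast]
  · rw [min_eq_right (by omega), if_neg (by omega)]
    have h0 : (xs.length - j + n - 1) / n = 0 := Nat.div_eq_of_lt (by omega)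
    rw [h0]
    simp

theorem slice?_eq_stride (xs : List Int) (j n : Nat) (hn : 1 ≤ n) :
    PySem.List.slice? xs (some (j:Int)) none (n:Int) = some (stride xs j n) := by
  rw [slice?_eq_filterMap xs j n hn, stride_eq_filterMap xs j n hn]

theorem zipWith_append_replicate (x : List (List Int)) :
    List.zipWith (· ++ ·) x (List.replicate x.length []) = x := by
  induction x with
  | nil => rfl
  | cons a t ih => simp [List.replicate_succ, ih]

theorem zipWith_replicate_append (d : List (List Int)) :
    List.zipWith (· ++ ·) (List.replicate d.length ([] : List Int)) d = d := by
  induction d with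
  | nil => rfl
  | cons a t ih => simp [List.replicate_succ, ih]

theorem zipWith_set_modify (x d : List (List Int)) (pt : Nat) (c : Int)
    (hpt : pt < x.length) (hd : d.length = x.length) :
    List.zipWith (· ++ ·) (x.set pt (x[pt] ++ [c])) d =
      List.zipWith (· ++ ·) x (d.modify pt (c :: ·)) := by
  apply List.ext_getElem
  · simp [hd]
  · intro i h1 h2
    rw [List.getElem_zipWith, List.getElem_zipWith, List.getElem_set, List.getElem_modify]
    by_cases hi : pt = i
    · subst hi
      rw [if_pos rfl, if_pos rfl, List.append_assoc, List.singleton_append]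
    · rw [if_neg hi, if_neg hi]

theorem foldl_deal (n_hands : Int) (cs : List Int) (x : List (List Int)) (p : Int)
    (hx : (x.length : Int) = n_hands) (hp : 0 ≤ p) (hpn : p < n_hands) :
    (cs.foldl (fun (st : List (List Int) × Int) c =>
       (PySem.List.pySetD st.1 st.2 (PySem.List.pyGetD st.1 st.2 [] ++ [c]),
        if st.2 + 1 = n_hands then 0 else st.2 + 1)) (x, p)).1
    = List.zipWith (· ++ ·) x (dealAux n_hands.toNat p.toNat cs) := by
  induction cs generalizing x p with
  | nil =>
    show x = _
    rw [show dealAux n_hands.toNat p.toNat [] = List.replicate n_hands.toNat [] from rfl,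
        show n_hands.toNat = x.length by omega]
    exact (zipWith_append_replicate x).symm
  | cons c cs ih =>
    rw [List.foldl_cons]
    have hset : PySem.List.pySetD x p (PySem.List.pyGetD x p [] ++ [c]) =
        x.set p.toNat (x[p.toNat]'(by omega) ++ [c]) := by
      rw [PySem.List.pySetD_of_nonneg _ _ hp,
          PySem.List.pyGetD_eq_getElem _ _ hp (by omega)]
    have hlen1 : ((x.set p.toNat (x[p.toNat]'(by omega) ++ [c])).length : Int) = n_hands := by
      simp [hx]
    have hp1 : (0:Int) ≤ (if p + 1 = n_hands then 0 else p + 1) := by split <;> omega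
    have hp1n : (if p + 1 = n_hands then 0 else p + 1) < n_hands := by split <;> omega
    show (cs.foldl _ (PySem.List.pySetD x p (PySem.List.pyGetD x p [] ++ [c]),
        if p + 1 = n_hands then 0 else p + 1)).1 = _
    rw [hset, ih _ _ hlen1 hp1 hp1n]
    rw [show dealAux n_hands.toNat p.toNat (c :: cs) =
        (dealAux n_hands.toNat (if p.toNat + 1 = n_hands.toNat then 0 else p.toNat + 1) cs).modify
          p.toNat (c :: ·) from rfl]
    rw [show (if p + 1 = n_hands then (0:Int) else p + 1).toNat =
        (if p.toNat + 1 = n_hands.toNat then 0 else p.toNat + 1) by split_ifs <;> omega]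
    exact zipWith_set_modify x _ p.toNat c (by omega) (by rw [length_dealAux]; omega)

theorem distribute_cards_eq_dealAux (cards : List Int) (n_hands : Int) (h : 1 ≤ n_hands) :
    distribute_cards cards n_hands = dealAux n_hands.toNat 0 cards := by
  unfold distribute_cards
  rw [PySem.List.foldl_append_singleton_eq_map (f := fun _ => ([] : List Int))]
  rw [List.nil_append, List.map_const', PySem.List.length_pyRange_one]
  have hloop := PySem.List.foldl_pyRange_zero_pyGetD' cards 0
    (fun (st : List (List Int) × Int) c =>
      (PySem.List.pySetD st.1 st.2 (PySem.List.pyGetD st.1 st.2 [] ++ [c]),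
       if st.2 + 1 = n_hands then 0 else st.2 + 1))
    (List.replicate (n_hands - 0).toNat ([] : List Int), (0 : Int))
  rw [hloop]
  rw [foldl_deal n_hands cards _ 0 (by simp; omega) le_rfl (by omega)]
  rw [show ((n_hands - 0).toNat) = n_hands.toNat by omega, show ((0:Int)).toNat = 0 from rfl]
  have hz := zipWith_replicate_append (dealAux n_hands.toNat 0 cards)
  rw [length_dealAux] at hz
  exact hz

theorem distribute_cards_alt_eq_dealAux (cards : List Int) (n_hands : Int) (h : 1 ≤ n_hands) :
    distribute_cards_alt cards n_hands = dealAux n_hands.toNat 0 cards := by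
  unfold distribute_cards_alt
  apply List.ext_getElem
  · simp [PySem.List.length_pyRange_one, length_dealAux]
  · intro k h1 h2
    have hk : k < n_hands.toNat := by
      simpa [PySem.List.length_pyRange_one] using h1
    rw [List.getElem_map, PySem.List.getElem_pyRange_one]
    conv_lhs => rw [show ((0:Int) + (k:Int)) = ((k : Nat) : Int) by omega,
                    show n_hands = ((n_hands.toNat : Nat) : Int) by omega]
    rw [slice?_eq_stride cards k n_hands.toNat (by omega)]
    rw [Option.getD_some]
    rw [dealAux_getElem n_hands.toNat cards 0 k (by omega) hk]
    rw [if_pos (Nat.zero_le k), Nat.sub_zero]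

-- ===== VERDICT (by name: the statement is the Claim_ definition above) =====
theorem distribute_cards_spec : Claim_equal_distribute_cards := by
  intro cards n_hands _ hpre
  unfold Spec_distribute_cards
  by_cases h : 1 ≤ n_hands
  · rw [distribute_cards_eq_dealAux cards n_hands h,
        distribute_cards_alt_eq_dealAux cards n_hands h]
  · have hc : cards = [] := by
      rcases hpre with h1 | h1
      · omega
      · exact h1
    subst hc
    have hr : PySem.List.pyRange 0 n_hands 1 = [] := PySem.List.pyRange_one_eq_nil (by omega)
    unfold distribute_cards distribute_cards_alt
    simp [hr, PySem.List.pyRange_one_eq_nil (le_refl (0:Int))]
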